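-- pv_equiv track=rewrite | github.com/alittlelittlepanda/CS50P_2022 | chap1/14plates.py | end_with_num
-- ===== SOURCE A (Python) =====
-- def end_with_num(s) :
--     flag = 0
--     for _ in s :
--         if '0' <= _ <= '9' :
--             flag = 1
--         elif flag == 1 and 'A' <= _ <= 'Z' :
--             return False
--     return True
-- ===== SOURCE B (Python) =====
-- def end_with_num(s):
--     # locate first digit, then scan only the suffix after it for an uppercase letter
--     idx = None
--     for i, c in enumerate(s):
--         if '0' <= c <= '9':
--             idx = i
--             break
--     if idx is None:
--         return True
--     return not any('A' <= c <= 'Z' for c in s[idx+1:])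
-- ===== Notes on version B (the rewrite author's own statement) =====
-- stated objective: alternative
-- what changed: Replaces A's single stateful flag-pass with a locate-then-scan decomposition: find the index of the first digit, then check only the suffix after it for an uppercase letter.
import Mathlib
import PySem

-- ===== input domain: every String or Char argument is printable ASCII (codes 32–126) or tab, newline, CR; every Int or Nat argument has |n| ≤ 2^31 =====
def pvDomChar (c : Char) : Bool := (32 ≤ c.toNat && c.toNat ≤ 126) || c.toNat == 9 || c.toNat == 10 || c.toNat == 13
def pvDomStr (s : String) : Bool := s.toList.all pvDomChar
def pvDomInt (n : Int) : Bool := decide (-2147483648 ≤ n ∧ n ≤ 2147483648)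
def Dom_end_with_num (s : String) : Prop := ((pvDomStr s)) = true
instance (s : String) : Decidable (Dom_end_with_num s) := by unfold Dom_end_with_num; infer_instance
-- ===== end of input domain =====

-- B replaces A's single stateful flag-pass with a locate-then-scan decomposition (find first digit, then scan only the suffix after it for an uppercase letter); objective: alternative.


-- ===== PORT A =====
-- A's loop over the characters with the flag as state; returning false aborts the loop.
def endNumLoopA : List Char → Nat → Bool
  | [], _ => true
  | c :: rest, flag =>
    if '0' ≤ c ∧ c ≤ '9' then endNumLoopA rest 1
    else if flag = 1 ∧ 'A' ≤ c ∧ c ≤ 'Z' then false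
    else endNumLoopA rest flag

def end_with_num (s : String) : Bool := endNumLoopA s.toList 0

-- ===== PORT B =====
-- B's first loop: find the suffix after the first digit (none = no digit found).
def firstDigitSuffix : List Char → Option (List Char)
  | [] => none
  | c :: rest => if '0' ≤ c ∧ c ≤ '9' then some rest else firstDigitSuffix rest

def end_with_num_alt (s : String) : Bool :=
  match firstDigitSuffix s.toList with
  | none => true
  | some suf => !(suf.any (fun c => decide ('A' ≤ c ∧ c ≤ 'Z')))

-- ===== PRECONDITION & SPEC =====
def Spec_end_with_num (s : String) (out : Bool) : Prop := out = end_with_num_alt s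
instance (s : String) (out : Bool) : Decidable (Spec_end_with_num s out) := by unfold Spec_end_with_num; infer_instance

-- ===== CLAIM (what is proved, stated in full; the proofs are below) =====
def Claim_equal_end_with_num : Prop := ∀ (s : String), Dom_end_with_num s → Spec_end_with_num s (end_with_num s)

-- ===== LEMMAS AND PROOFS =====

-- With the flag set, A's loop returns true iff no uppercase letter remains.
theorem endNumLoopA_one (l : List Char) :
    endNumLoopA l 1 = !(l.any (fun c => decide ('A' ≤ c ∧ c ≤ 'Z'))) := by
  induction l with
  | nil => rfl
  | cons c rest ih =>
    simp only [endNumLoopA, List.any_cons]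
    by_cases hd : '0' ≤ c ∧ c ≤ '9'
    · have hu : ¬ ('A' ≤ c ∧ c ≤ 'Z') := by
        rintro ⟨h1, _⟩
        exact absurd (le_trans h1 hd.2) (by decide)
      simp [hd, hu, ih]
    · by_cases hu : 'A' ≤ c ∧ c ≤ 'Z'
      · simp [hd, hu]
      · simp [hd, hu, ih]

theorem endNumLoopA_zero (l : List Char) :
    endNumLoopA l 0 = match firstDigitSuffix l with
      | none => true
      | some suf => !(suf.any (fun c => decide ('A' ≤ c ∧ c ≤ 'Z'))) := by
  induction l with
  | nil => rfl
  | cons c rest ih =>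
    simp only [endNumLoopA, firstDigitSuffix]
    by_cases hd : '0' ≤ c ∧ c ≤ '9'
    · simp [hd, endNumLoopA_one]
    · simp [hd, ih]

-- ===== VERDICT (by name: the statement is the Claim_ definition above) =====
theorem end_with_num_spec : Claim_equal_end_with_num := by
  intro s _
  unfold Spec_end_with_num end_with_num end_with_num_alt
  exact endNumLoopA_zero s.toList
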